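-- pv_equiv track=rewrite | github.com/Suborno-Deb-Bappon/LeetCode | L-36 : Valid Sudoku.py | duplicate_rows
-- ===== SOURCE A (Python) =====
-- def duplicate_rows(matrix):
--     for a in matrix:
--         seen = set()
--         for b in a:
--             if b.isdigit() and b in seen:
--                 return True
--             if b.isdigit():
--                 seen.add(b)
--     return False
-- ===== SOURCE B (Python) =====
-- def duplicate_rows(matrix):
--     for a in matrix:
--         d = sorted(b for b in a if b.isdigit())
--         if any(x == y for x, y in zip(d, d[1:])):
--             return True
--     return False
-- ===== Notes on version B (the rewrite author's own statement) =====
-- stated objective: alternative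
-- what changed: Replaces the incremental hash-set with per-character membership test and early inner exit by sort-then-adjacent-scan: each row's digits are sorted and a duplicate is detected as an equal adjacent pair.
import Mathlib
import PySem

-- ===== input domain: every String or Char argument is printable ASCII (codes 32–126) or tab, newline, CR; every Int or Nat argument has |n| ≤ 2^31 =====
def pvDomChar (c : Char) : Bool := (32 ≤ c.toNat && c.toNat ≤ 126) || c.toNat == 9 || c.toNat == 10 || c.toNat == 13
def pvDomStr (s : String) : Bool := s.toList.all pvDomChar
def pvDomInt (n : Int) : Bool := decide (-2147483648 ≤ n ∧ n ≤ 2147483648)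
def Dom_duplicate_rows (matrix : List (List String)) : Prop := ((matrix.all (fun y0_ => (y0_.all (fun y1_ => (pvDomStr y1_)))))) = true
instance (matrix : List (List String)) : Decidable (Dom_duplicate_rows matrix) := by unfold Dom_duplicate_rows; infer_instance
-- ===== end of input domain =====

-- B replaces A's incremental seen-set with membership test and early inner exit by
-- sort-then-adjacent-scan: each row's digits are sorted and a duplicate is detected
-- as an equal adjacent pair (objective: alternative).

-- ===== PORT A =====
-- inner 'for b in a' loop carrying the seen set; true = the early 'return True' fired
def pvRowLoopA (seen : PySem.Set String) : List String → Bool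
  | [] => false
  | b :: rest =>
    if PySem.Str.strIsdigit b && seen.contains b then true
    else pvRowLoopA (if PySem.Str.strIsdigit b then PySem.Set.add seen b else seen) rest

def duplicate_rows (matrix : List (List String)) : Bool :=
  match matrix with
  | [] => false
  | a :: rest =>
    if pvRowLoopA PySem.Set.empty a then true else duplicate_rows rest

-- ===== PORT B =====
def duplicate_rows_alt (matrix : List (List String)) : Bool :=
  match matrix with
  | [] => false
  | a :: rest =>
    let d := PySem.List.sorted (a.filter (fun b => PySem.Str.strIsdigit b)) (fun x => x) false
    -- any(x == y for x, y in zip(d, d[1:]))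
    if (d.zip (PySem.List.slice d (some 1) none)).any (fun p => p.1 == p.2) then true
    else duplicate_rows_alt rest

-- ===== PRECONDITION & SPEC =====
def Spec_duplicate_rows (matrix : List (List String)) (out : Bool) : Prop := out = duplicate_rows_alt matrix
instance (matrix : List (List String)) (out : Bool) : Decidable (Spec_duplicate_rows matrix out) := by unfold Spec_duplicate_rows; infer_instance

-- ===== CLAIM (what is proved, stated in full; the proofs are below) =====
def Claim_equal_duplicate_rows : Prop := ∀ (matrix : List (List String)), Dom_duplicate_rows matrix → Spec_duplicate_rows matrix (duplicate_rows matrix)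

-- ===== LEMMAS AND PROOFS =====

-- A's inner loop fires iff the row's digit list repeats a digit or meets `seen`
theorem pvRowLoopA_iff (bs : List String) (s : PySem.Set String) :
    pvRowLoopA s bs = true ↔
      ¬ ((bs.filter (fun b => PySem.Str.strIsdigit b)).Nodup
          ∧ ∀ b ∈ bs.filter (fun b => PySem.Str.strIsdigit b), b ∉ s) := by
  induction bs generalizing s with
  | nil => simp [pvRowLoopA]
  | cons b rest ih =>
    by_cases hd : PySem.Str.strIsdigit b = true
    · rw [pvRowLoopA, List.filter_cons_of_pos hd]
      by_cases hm : b ∈ s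
      · have hc : PySem.Set.contains s b = true := by simp [hm]
        rw [if_pos (by rw [hd, hc]; rfl)]
        constructor
        · rintro - ⟨-, hall⟩
          exact hall b (List.mem_cons_self ..) hm
        · intro _; rfl
      · have hc : PySem.Set.contains s b = false := by simp [hm]
        have hadd : PySem.Set.add s b = s ++ [b] := by simp [PySem.Set.add, hm]
        rw [if_neg (by rw [hc]; simp), if_pos hd, hadd, ih]
        apply not_congr
        constructor
        · rintro ⟨hnd, hall⟩
          refine ⟨List.nodup_cons.mpr ⟨fun hb => (hall b hb) (by simp), hnd⟩, ?_⟩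
          intro x hx
          rcases List.mem_cons.mp hx with rfl | hx'
          · exact hm
          · exact fun hxs => hall x hx' (by simp [hxs])
        · rintro ⟨hnd, hall⟩
          obtain ⟨hnb, hnd'⟩ := List.nodup_cons.mp hnd
          refine ⟨hnd', ?_⟩
          intro x hx hxapp
          rcases List.mem_append.mp hxapp with hxs | hxb
          · exact hall x (List.mem_cons_of_mem _ hx) hxs
          · have hxb' : x = b := by simpa using hxb
            exact hnb (hxb' ▸ hx)
    · have hd' : PySem.Str.strIsdigit b = false := Bool.eq_false_iff.mpr hd
      rw [pvRowLoopA, List.filter_cons_of_neg (by simpa using hd'), hd']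
      simp only [Bool.false_and, Bool.false_eq_true, if_false, ih]

theorem pvRowA_iff (a : List String) :
    pvRowLoopA PySem.Set.empty a = true ↔
      ¬ (a.filter (fun b => PySem.Str.strIsdigit b)).Nodup := by
  rw [pvRowLoopA_iff]
  simp [PySem.Set.empty]

-- a ≤-sorted list has an equal adjacent pair iff it has a duplicate
theorem pvAdj_iff (d : List String) (hp : d.Pairwise (· ≤ ·)) :
    ((d.zip (d.drop 1)).any (fun p => p.1 == p.2) = true) ↔ ¬ d.Nodup := by
  induction d with
  | nil => simp
  | cons x t ih =>
    cases t with
    | nil => simp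
    | cons y t' =>
      have hxy : x ≤ y := (List.pairwise_cons.mp hp).1 y (List.mem_cons_self ..)
      have hyt : ∀ z ∈ t', y ≤ z :=
        fun z hz => (List.pairwise_cons.mp (List.pairwise_cons.mp hp).2).1 z hz
      have ih' := ih (List.pairwise_cons.mp hp).2
      simp only [List.drop_succ_cons, List.drop_zero] at ih' ⊢
      by_cases hxy' : x = y
      · subst hxy'
        simp
      · have hxt : x ∉ y :: t' := by
          intro hmem
          rcases List.mem_cons.mp hmem with h' | hx'
          · exact hxy' h'
          · exact hxy' (le_antisymm hxy (hyt x hx'))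
        simp only [List.zip_cons_cons, List.any_cons, Bool.or_eq_true, beq_iff_eq]
        constructor
        · rintro (h | h)
          · exact absurd h hxy'
          · intro hnd
            exact (ih'.mp h) (List.Nodup.of_cons hnd)
        · intro h
          exact Or.inr (ih'.mpr (fun hnd' => h (List.nodup_cons.mpr ⟨hxt, hnd'⟩)))

theorem pvAgree (matrix : List (List String)) : duplicate_rows matrix = duplicate_rows_alt matrix := by
  induction matrix with
  | nil => rfl
  | cons a rest ih =>
    simp only [duplicate_rows, duplicate_rows_alt]
    have hslice : PySem.List.slice
        (PySem.List.sorted (a.filter (fun b => PySem.Str.strIsdigit b)) (fun x => x) false) (some 1) none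
        = (PySem.List.sorted (a.filter (fun b => PySem.Str.strIsdigit b)) (fun x => x) false).drop 1 := by
      rw [PySem.List.slice_from_one, ← List.drop_one]
    have hperm := PySem.List.sorted_perm (a.filter (fun b => PySem.Str.strIsdigit b)) (fun x => x) false
    have hnd : (PySem.List.sorted (a.filter (fun b => PySem.Str.strIsdigit b)) (fun x => x) false).Nodup
        ↔ (a.filter (fun b => PySem.Str.strIsdigit b)).Nodup := hperm.nodup_iff
    have hpair : (PySem.List.sorted (a.filter (fun b => PySem.Str.strIsdigit b)) (fun x => x) false).Pairwise (· ≤ ·) := by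
      simpa using PySem.List.sorted_pairwise (a.filter (fun b => PySem.Str.strIsdigit b)) (fun x => x)
    have h2 := pvAdj_iff _ hpair
    rw [hnd] at h2
    have hrow : pvRowLoopA PySem.Set.empty a
        = ((PySem.List.sorted (a.filter (fun b => PySem.Str.strIsdigit b)) (fun x => x) false).zip
            ((PySem.List.sorted (a.filter (fun b => PySem.Str.strIsdigit b)) (fun x => x) false).drop 1)).any
            (fun p => p.1 == p.2) :=
      Bool.eq_iff_iff.mpr ((pvRowA_iff a).trans h2.symm)
    rw [hslice, hrow, ih]

-- ===== VERDICT (by name: the statement is the Claim_ definition above) =====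
theorem duplicate_rows_spec : Claim_equal_duplicate_rows := by
  intro matrix _
  exact pvAgree matrix
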